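-- pv_equiv track=rewrite | github.com/BenjaminAnding/sturdy-chainsaw | Level1/minion-task-scheduling_solution.py | solution
-- ===== SOURCE A (Python) =====
-- def solution(data, n):
--     idcounts = {}
--     filtered = []
--     f = []
--     for i in data:
--         if i not in idcounts.keys():
--             idcounts[i] = 1
--         else:
--             idcounts[i] += 1
--     filtered = [a for a in data if idcounts[a] <= n]
--     return filtered
-- ===== SOURCE B (Python) =====
-- def _runs(s):
--     # runs of equal adjacent values in s: list of (value, run_length)
--     out = []
--     i = 0
--     while i < len(s):
--         j = i + 1
--         while j < len(s) and s[j] == s[i]: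
--             j += 1
--         out.append((s[i], j - i))
--         i = j
--     return out
--
-- def solution(data, n):
--     # Sort a copy, scan the runs of equal values once, collect the values
--     # whose run (= total count) exceeds n into a set, then filter data.
--     bad = {v for v, k in _runs(sorted(data)) if k > n}
--     return [a for a in data if a not in bad]
-- ===== Notes on version B (the rewrite author's own statement) =====
-- stated objective: alternative
-- what changed: Replaces the frequency dictionary with sort-then-scan: sort a copy, walk its runs of equal values once to collect into a set the values occurring more than n times, then filter the original list against that set.
import Mathlib
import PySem

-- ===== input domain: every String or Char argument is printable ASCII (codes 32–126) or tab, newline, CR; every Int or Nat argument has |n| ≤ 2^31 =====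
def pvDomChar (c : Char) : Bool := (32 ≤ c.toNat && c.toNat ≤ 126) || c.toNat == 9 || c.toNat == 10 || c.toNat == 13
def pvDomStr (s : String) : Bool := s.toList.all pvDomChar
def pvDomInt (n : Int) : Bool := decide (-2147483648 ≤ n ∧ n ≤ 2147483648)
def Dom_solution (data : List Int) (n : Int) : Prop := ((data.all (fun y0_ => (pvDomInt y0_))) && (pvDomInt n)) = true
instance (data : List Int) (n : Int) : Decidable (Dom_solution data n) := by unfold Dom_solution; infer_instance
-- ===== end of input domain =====

-- B replaces A's counting dictionary with sort-then-scan: sort a copy, walk its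
-- runs of equal values once collecting values with run length > n into a set, then filter.

-- ===== PORT A =====
-- A: build idcounts with a loop (insert 1 if absent, else increment), then filter by idcounts[a] <= n.
def solution (data : List Int) (n : Int) : List Int :=
  let idcounts : PySem.Dict Int Int :=
    data.foldl (fun d i =>
      if d.contains i = false then d.insert i 1
      else d.insert i (d.getD i 0 + 1)) PySem.Dict.empty
  data.filter (fun a => decide (idcounts.getD a 0 <= n))

-- ===== PORT B =====
-- _runs: each pass of the outer while loop emits one run — the inner
-- 'j = i + 1; while j < len(s) and s[j] == s[i]: j += 1' takes the longest prefix
-- of the tail equal to s[i] (List.span) — and continues at i = j (the rest).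
def pvRuns : List Int -> List (Int × Nat)
  | [] => []
  | v :: t =>
    let p := t.span (fun x => x == v)
    (v, p.1.length + 1) :: pvRuns p.2
termination_by s => s.length
decreasing_by
  simp only [List.span_eq_takeWhile_dropWhile]
  have := List.length_dropWhile_le (fun x => x == v) t
  simp; omega

def solution_alt (data : List Int) (n : Int) : List Int :=
  let bad : PySem.Set Int :=
    PySem.Set.ofList
      (((pvRuns (PySem.List.sorted data (fun x => x) false)).filter
          (fun r => decide (n < (r.2 : Int)))).map (fun r => r.1))
  data.filter (fun a => !(PySem.Set.contains bad a))

-- ===== PRECONDITION & SPEC =====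
def Spec_solution (data : List Int) (n : Int) (out : List Int) : Prop := out = solution_alt data n
instance (data : List Int) (n : Int) (out : List Int) : Decidable (Spec_solution data n out) := by unfold Spec_solution; infer_instance

-- ===== CLAIM (what is proved, stated in full; the proofs are below) =====
def Claim_equal_solution : Prop := ∀ (data : List Int) (n : Int), Dom_solution data n → Spec_solution data n (solution data n)

-- ===== LEMMAS AND PROOFS =====

-- A's branching loop body coincides with the canonical 'insert x (getD x 0 + 1)' counting step.
lemma solution_step_eq (d : PySem.Dict Int Int) (i : Int) :
    (if d.contains i = false then d.insert i 1 else d.insert i (d.getD i 0 + 1))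
      = d.insert i (d.getD i 0 + 1) := by
  by_cases h : d.contains i = false
  · have h0 : d.getD i 0 = 0 := PySem.Dict.getD_of_not_contains d 0 h
    simp [h, h0]
  · simp [h]

lemma solution_counts (data : List Int) (v : Int) :
    (data.foldl (fun (d : PySem.Dict Int Int) i =>
      if d.contains i = false then d.insert i 1
      else d.insert i (d.getD i 0 + 1)) PySem.Dict.empty).getD v 0 = (data.count v : Int) := by
  rw [List.foldl_ext
      (fun (d : PySem.Dict Int Int) i =>
        if d.contains i = false then d.insert i 1 else d.insert i (d.getD i 0 + 1))
      (fun (d : PySem.Dict Int Int) i => d.insert i (d.getD i 0 + 1)) PySem.Dict.empty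
      (fun d i _ => solution_step_eq d i)]
  rw [PySem.Dict.getD_foldl_insert_add_one]
  simp

-- On a (weakly) sorted list, pvRuns lists each distinct value exactly once with its total count.
lemma pvRuns_mem (v : Int) (k : Nat) :
    ∀ (s : List Int), s.Pairwise (· ≤ ·) → ((v, k) ∈ pvRuns s ↔ v ∈ s ∧ k = s.count v) := by
  intro s
  induction s using pvRuns.induct with
  | case1 => intro _; simp [pvRuns]
  | case2 h t p ih =>
    intro hs
    simp only [p, List.span_eq_takeWhile_dropWhile] at ih
    simp only [pvRuns, List.span_eq_takeWhile_dropWhile]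
    set r := t.takeWhile (fun x => x == h) with hr
    set rest := t.dropWhile (fun x => x == h) with hrest
    have ht : r ++ rest = t := List.takeWhile_append_dropWhile
    have hrall : ∀ x ∈ r, x = h := by
      intro x hx
      have := List.mem_takeWhile_imp hx
      simpa using this
    have hle : ∀ x ∈ t, h ≤ x := fun x hx => List.rel_of_pairwise_cons hs hx
    have hpwt : t.Pairwise (· ≤ ·) := hs.of_cons
    have hrestpw : rest.Pairwise (· ≤ ·) := hpwt.sublist (List.dropWhile_sublist _)
    have hrestsub : ∀ x ∈ rest, x ∈ t := fun x hx => (List.dropWhile_sublist _).mem hx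
    have hnotmem : h ∉ rest := by
      intro hmem
      cases hR : rest with
      | nil => rw [hR] at hmem; simp at hmem
      | cons g rs =>
        have hne : t.dropWhile (fun x => x == h) ≠ [] := by rw [← hrest, hR]; simp
        have hgh' := List.head_dropWhile_not (fun x => x == h) hne
        have h1 : (List.dropWhile (fun x => x == h) t).head? = some g := by
          rw [← hrest, hR]; rfl
        rw [List.head?_eq_some_head hne] at h1
        rw [Option.some.inj h1] at hgh'
        have hgh : ¬ g = h := by simpa using hgh'
        rw [hR] at hmem hrestpw
        rcases List.mem_cons.mp hmem with he | hmem'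
        · exact hgh he.symm
        · have hgle : g ≤ h := List.rel_of_pairwise_cons hrestpw hmem'
          have hge : h ≤ g := hle g (hrestsub g (by rw [hR]; simp))
          exact hgh (le_antisymm hgle hge)
    have hcr : r.count h = r.length := by
      rw [List.count_eq_length]
      intro b hb; simpa using (hrall b hb).symm
    have hcrest0 : rest.count h = 0 := List.count_eq_zero.mpr hnotmem
    rw [List.mem_cons, ih hrestpw, Prod.mk.injEq]
    constructor
    · rintro (⟨rfl, rfl⟩ | ⟨hv, rfl⟩)
      · refine ⟨List.mem_cons_self, ?_⟩
        rw [← ht]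
        simp [List.count_append, hcr, hcrest0]
      · have hvne : v ≠ h := fun e => hnotmem (e ▸ hv)
        have hcvr : r.count v = 0 := List.count_eq_zero.mpr (fun hm => hvne (hrall v hm))
        refine ⟨List.mem_cons_of_mem _ (hrestsub v hv), ?_⟩
        rw [← ht]
        simp [List.count_append, hcvr, Ne.symm hvne]
    · rintro ⟨hv, rfl⟩
      by_cases hveq : v = h
      · subst hveq
        left
        refine ⟨rfl, ?_⟩
        rw [← ht]
        simp [List.count_append, hcr, hcrest0]
      · right
        have hvt : v ∈ t := by
          rcases List.mem_cons.mp hv with he | h' ; exact absurd he hveq; exact h'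
        have hvrest : v ∈ rest := by
          rcases List.mem_append.mp (ht ▸ hvt) with hvr | hvr
          · exact absurd (hrall v hvr) hveq
          · exact hvr
        have hcvr : r.count v = 0 := List.count_eq_zero.mpr (fun hm => hveq (hrall v hm))
        refine ⟨hvrest, ?_⟩
        rw [← ht]
        simp [List.count_append, hcvr, Ne.symm hveq]

-- ===== VERDICT (by name: the statement is the Claim_ definition above) =====
theorem solution_spec : Claim_equal_solution := by
  intro data n _
  unfold Spec_solution solution solution_alt
  apply List.filter_congr
  intro a ha
  have hperm := PySem.List.sorted_perm data (fun x => x) false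
  have hcount : (PySem.List.sorted data (fun x => x) false).count a = data.count a :=
    hperm.count_eq a
  have hmem : a ∈ PySem.List.sorted data (fun x => x) false := by
    rw [PySem.List.mem_sorted]; exact ha
  have hpw : (PySem.List.sorted data (fun x => x) false).Pairwise (· ≤ ·) :=
    PySem.List.sorted_pairwise data (fun x => x)
  have key : (a ∈ PySem.Set.ofList
      (((pvRuns (PySem.List.sorted data (fun x => x) false)).filter
          (fun r => decide (n < (r.2 : Int)))).map (fun r => r.1)))
      ↔ n < (data.count a : Int) := by
    rw [PySem.Set.mem_ofList]
    simp only [List.mem_map, List.mem_filter, decide_eq_true_eq]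
    constructor
    · rintro ⟨⟨w, k⟩, ⟨hr, hk⟩, rfl⟩
      obtain ⟨_, hkeq⟩ := (pvRuns_mem w k _ hpw).mp hr
      rw [hkeq, hcount] at hk
      exact hk
    · intro hlt
      refine ⟨(a, (PySem.List.sorted data (fun x => x) false).count a),
        ⟨(pvRuns_mem a _ _ hpw).mpr ⟨hmem, rfl⟩, ?_⟩, rfl⟩
      rw [hcount]; exact hlt
  simp only [solution_counts, PySem.Set.contains, List.contains_eq_mem, key]
  rw [← decide_not]
  simp [not_lt]
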